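-- pv_equiv track=rewrite | github.com/drabbit17/advent2020 | solutions/day17/solution.py | access_element
-- ===== SOURCE A (Python) =====
-- def access_element(space, list_of_indexes):
--     try:
--         if list_of_indexes and list_of_indexes[0] < 0:
--             raise IndexError
--         elif len(list_of_indexes) > 1:
--             return access_element(space[list_of_indexes[0]], list_of_indexes[1:])
--         else:
--             return space[list_of_indexes[0]]
--     except IndexError:
--         return "."
-- ===== SOURCE B (Python) =====
-- def access_element(space, list_of_indexes):
--     # Iterative descent: a negative index anywhere, an empty path, or an
--     # out-of-range step all mean "no such element" -> ".".
--     if not list_of_indexes or any(i < 0 for i in list_of_indexes):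
--         return "."
--     current = space
--     try:
--         for i in list_of_indexes:
--             current = current[i]
--     except IndexError:
--         return "."
--     return current
-- ===== Notes on version B (the rewrite author's own statement) =====
-- stated objective: simpler
-- what changed: Replaces A's recursion (with per-level try/except and list slicing) by one upfront any()-negative check plus a single iterative indexing loop under one try/except.
-- outside the precondition, e.g. on access_element([[['a']]], [0]): A returns [['a']], B returns [['a']]; on access_element([[['a']]], [0, 0]): A returns ['a'], B returns ['a']
import Mathlib
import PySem

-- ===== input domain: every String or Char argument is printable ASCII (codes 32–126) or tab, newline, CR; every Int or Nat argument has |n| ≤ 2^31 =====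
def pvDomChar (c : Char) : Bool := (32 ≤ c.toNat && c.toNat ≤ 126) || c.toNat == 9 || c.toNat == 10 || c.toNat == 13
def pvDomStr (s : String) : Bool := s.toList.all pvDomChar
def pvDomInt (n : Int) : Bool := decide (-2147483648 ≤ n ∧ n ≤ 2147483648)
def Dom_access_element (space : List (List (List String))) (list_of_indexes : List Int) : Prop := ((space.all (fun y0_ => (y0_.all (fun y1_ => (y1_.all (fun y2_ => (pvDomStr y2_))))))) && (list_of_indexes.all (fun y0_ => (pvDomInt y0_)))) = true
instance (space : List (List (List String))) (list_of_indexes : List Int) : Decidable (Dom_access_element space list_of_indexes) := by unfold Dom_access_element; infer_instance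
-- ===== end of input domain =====

-- B replaces A's recursion (per-level try/except, list slicing) by one upfront
-- negative-index check plus a single iterative indexing loop: simpler.

-- ===== PORT A =====
-- A is type-generic recursion; under the type convention it is transliterated
-- level by level (list-of-list-of-list, then string indexing for deeper paths).
-- Where the Python returns a non-String (in-range path of length 1 or 2, outside
-- Pre_access_element below) the port returns ".".

def aStr (s : String) : List Int → String
  | [] => "."                                   -- list_of_indexes[0]: IndexError → "."
  | i :: rest =>
    if i < 0 then "."                           -- raise IndexError → "."
    else if rest.isEmpty then
      match PySem.Str.pyGet? s i with
      | some c => String.ofList [c]                 -- return space[i]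
      | none => "."
    else
      match PySem.Str.pyGet? s i with
      | some c => aStr (String.ofList [c]) rest     -- recurse into space[i]
      | none => "."

def aL1 (l : List String) : List Int → String
  | [] => "."
  | i :: rest =>
    if i < 0 then "."
    else if rest.isEmpty then
      match PySem.List.pyGet? l i with
      | some s => s
      | none => "."
    else
      match PySem.List.pyGet? l i with
      | some s => aStr s rest
      | none => "."

def aL2 (l : List (List String)) : List Int → String
  | [] => "."
  | i :: rest =>
    if i < 0 then "."
    else if rest.isEmpty then
      match PySem.List.pyGet? l i with
      | some _ => "."                           -- Python returns a list here: outside Pre_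
      | none => "."
    else
      match PySem.List.pyGet? l i with
      | some l1 => aL1 l1 rest
      | none => "."

def access_element (space : List (List (List String))) (list_of_indexes : List Int) : String :=
  match list_of_indexes with
  | [] => "."                                   -- list_of_indexes[0]: IndexError → "."
  | i :: rest =>
    if i < 0 then "."
    else if rest.isEmpty then
      match PySem.List.pyGet? space i with
      | some _ => "."                           -- Python returns a list here: outside Pre_
      | none => "."
    else
      match PySem.List.pyGet? space i with
      | some l2 => aL2 l2 rest
      | none => "."

-- ===== PORT B =====
-- Source B: upfront negative check, then one indexing loop under a try/except.
-- The typed loop body is staged by level (three list levels, then string chars);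
-- IndexError is 'none', caught by the final getD ".". Where the Python loop ends
-- on a non-String (in-range path of length 1 or 2, outside Pre_) the port gives none.

def bStrWalk (s : String) : List Int → Option String
  | [] => some s
  | i :: rest =>
    match PySem.Str.pyGet? s i with
    | some c => bStrWalk (String.ofList [c]) rest
    | none => none

def bNavigate (space : List (List (List String))) (idxs : List Int) : Option String :=
  match idxs with
  | i0 :: i1 :: i2 :: rest =>
    (PySem.List.pyGet? space i0).bind fun l2 =>
    (PySem.List.pyGet? l2 i1).bind fun l1 =>
    (PySem.List.pyGet? l1 i2).bind fun s =>
    bStrWalk s rest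
  | _ => none                                   -- path shorter than 3 never ends on a String

def access_element_alt (space : List (List (List String))) (list_of_indexes : List Int) : String :=
  if list_of_indexes.isEmpty || list_of_indexes.any (fun i => decide (i < 0)) then "."
  else (bNavigate space list_of_indexes).getD "."

-- ===== PRECONDITION & SPEC =====
-- Pre_ excludes in-range index paths of length 1 or 2: there the Python programs
-- (both A and B) return a nested LIST, which is not a value of the declared
-- String return type.
def Pre_access_element (space : List (List (List String))) (list_of_indexes : List Int) : Prop :=
  (match list_of_indexes with
   | [i] => decide (i < 0 ∨ (space.length : Int) ≤ i)
   | [i, j] => decide (i < 0 ∨ j < 0 ∨ (space.length : Int) ≤ i ∨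
                 ((space.getD i.toNat []).length : Int) ≤ j)
   | _ => true) = true
instance (space : List (List (List String))) (list_of_indexes : List Int) : Decidable (Pre_access_element space list_of_indexes) := by unfold Pre_access_element; infer_instance

def pvWitness_access_element : List (List (List String)) × List Int := ([[["ab"], ["c"]]], [0, 0, 0])

def Spec_access_element (space : List (List (List String))) (list_of_indexes : List Int) (out : String) : Prop := out = access_element_alt space list_of_indexes
instance (space : List (List (List String))) (list_of_indexes : List Int) (out : String) : Decidable (Spec_access_element space list_of_indexes out) := by unfold Spec_access_element; infer_instance

-- ===== CLAIM (what is proved, stated in full; the proofs are below) =====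
def Claim_equal_access_element : Prop := ∀ (space : List (List (List String))) (list_of_indexes : List Int), Dom_access_element space list_of_indexes → Pre_access_element space list_of_indexes → Spec_access_element space list_of_indexes (access_element space list_of_indexes)

-- ===== LEMMAS AND PROOFS =====

-- A's string-level recursion agrees with B's walk once the path is nonempty.
lemma aStr_eq_walk (idxs : List Int) : ∀ s : String, idxs ≠ [] →
    aStr s idxs = (if idxs.any (fun i => decide (i < 0)) then "."
                   else (bStrWalk s idxs).getD ".") := by
  induction idxs with
  | nil => intro s h; exact absurd rfl h
  | cons i rest ih =>
    intro s _
    by_cases hi : i < 0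
    · simp [aStr, hi]
    · cases rest with
      | nil =>
        cases h : PySem.List.pyGet? s.toList i <;> simp [aStr, bStrWalk, hi, h]
      | cons j rest' =>
        cases h : PySem.List.pyGet? s.toList i with
        | none => by_cases hr : (j :: rest').any (fun i => decide (i < 0)) <;>
            simp [aStr, bStrWalk, hi, h, hr]
        | some c =>
            rw [show aStr s (i :: j :: rest') = aStr (String.ofList [c]) (j :: rest') from by
                  simp [aStr, hi, h],
                ih _ (by simp)]
            simp [bStrWalk, hi, h]

theorem access_element_spec : Claim_equal_access_element := by
  intro space idxs _ hpre
  unfold Spec_access_element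
  match idxs with
  | [] => rfl
  | [i] =>
    by_cases hi : i < 0
    · simp [access_element, access_element_alt, hi]
    · cases h : PySem.List.pyGet? space i <;>
        simp [access_element, access_element_alt, bNavigate, hi, h]
  | [i, j] =>
    by_cases hi : i < 0
    · simp [access_element, access_element_alt, hi]
    · cases h : PySem.List.pyGet? space i with
      | none =>
        by_cases hj : j < 0 <;>
          simp [access_element, access_element_alt, bNavigate, hi, hj, h]
      | some l2 =>
        by_cases hj : j < 0
        · simp [access_element, access_element_alt, aL2, hi, hj, h]
        · cases h2 : PySem.List.pyGet? l2 j <;>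
            simp [access_element, access_element_alt, bNavigate, aL2, hi, hj, h, h2]
  | i :: j :: k :: rest =>
    by_cases hi : i < 0
    · simp [access_element, access_element_alt, hi]
    · cases h : PySem.List.pyGet? space i with
      | none =>
        by_cases hr : (j :: k :: rest).any (fun i => decide (i < 0)) <;>
          simp [access_element, access_element_alt, bNavigate, hi, h, hr]
      | some l2 =>
        by_cases hj : j < 0
        · simp [access_element, access_element_alt, aL2, hi, hj, h]
        · cases h2 : PySem.List.pyGet? l2 j with
          | none =>
            by_cases hr : (k :: rest).any (fun i => decide (i < 0)) <;>
              simp [access_element, access_element_alt, bNavigate, aL2, hi, hj, h, h2, hr]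
          | some l1 =>
            by_cases hk : k < 0
            · simp [access_element, access_element_alt, aL2, aL1, hi, hj, hk, h, h2]
            · cases h3 : PySem.List.pyGet? l1 k with
              | none =>
                by_cases hr : rest.any (fun i => decide (i < 0)) <;>
                  simp [access_element, access_element_alt, bNavigate, aL2, aL1, hi, hj, hk, h, h2, h3, hr]
              | some s =>
                cases rest with
                | nil =>
                  simp [access_element, access_element_alt, bNavigate, aL2, aL1, bStrWalk, hi, hj, hk, h, h2, h3]
                | cons m rest' =>
                  by_cases hr : (m :: rest').any (fun i => decide (i < 0)) <;>
                    simp [access_element, access_element_alt, bNavigate, aL2, aL1, hi, hj, hk,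
                          h, h2, h3, hr, aStr_eq_walk (m :: rest') s (by simp)]
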